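-- pv_equiv track=rewrite | github.com/serkanerip/kodilan-stats | backend/app/business/tags_finder.py | is_tag_in_text
-- ===== SOURCE A (Python) =====
-- def is_tag_in_text(tag, text) -> bool:
--     tag = tag.replace('-', ' ')
--     # react gecen kelimeler reactjs'e cevrildigi icin
--     # react-native tagini bulamiyor bu yüzden tagi sanki
--     # reactjs native gibiymis gibi gösteriyoruz.
--     if tag == 'react native':
--         tag = 'reactjs native'
--     pos = 0
--     # tag textte birden fazla yerde gecebilir bu yüzden while ile tum eslesmeleri kontrol ediyoruz.
--     while pos < len(text):
--         pos = text.find(tag, pos)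
--         if pos == -1:
--             break
--         prevChar = pos-1 < 0 and True or (text[pos-1] is ' ' or text[pos-1] is ',' or text[pos-1] is '\n')
--         nextChar = pos+len(tag) >= len(text) and True or text[pos+len(tag)] is ' ' or text[pos+len(tag)] is ',' or text[pos+len(tag)] is '\n'
--         if (nextChar and prevChar):
--             # apache kafka gibi tagler geldigi zaman tekrar apache icinde bulmasin diye tagi cumleden cikar.
--             return True
--         pos += len(tag)
--     return False
-- ===== SOURCE B (Python) =====
-- DELIMS = (' ', ',', '\n')
--
--
-- def _ok(c):
--     return c is None or c in DELIMS
--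
--
-- def is_tag_in_text(tag, text) -> bool:
--     tag = tag.replace('-', ' ')
--     if tag == 'react native':
--         tag = 'reactjs native'
--     # Split by the tag: the boundaries between consecutive parts are exactly
--     # the non-overlapping occurrences of the tag, scanned left to right.
--     parts = text.split(tag)
--     left = None  # character just before the current occurrence (None = start of text)
--     while len(parts) > 1:
--         head, nxt = parts[0], parts[1]
--         left_char = head[-1] if head else left
--         if nxt:
--             right_char = nxt[0]
--         elif len(parts) == 2:
--             right_char = None  # occurrence ends at end of text
--         else:
--             right_char = tag[0]  # another occurrence starts immediately
--         if _ok(left_char) and _ok(right_char):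
--             return True
--         parts = parts[1:]
--         left = tag[-1]  # previous character is now the tag's last character
--     return False
-- ===== Notes on version B (the rewrite author's own statement) =====
-- stated objective: alternative
-- what changed: Replaces the manual find/advance-by-len(tag) position loop with prevChar/nextChar index arithmetic by a single text.split(tag) whose part boundaries are exactly the non-overlapping occurrences, then a scan of the adjacent parts' edge characters.
-- outside the precondition, e.g. on is_tag_in_text('', ''): A returns False, B raises ValueError; on is_tag_in_text('', ','): A returns True, B raises ValueError
import Mathlib
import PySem

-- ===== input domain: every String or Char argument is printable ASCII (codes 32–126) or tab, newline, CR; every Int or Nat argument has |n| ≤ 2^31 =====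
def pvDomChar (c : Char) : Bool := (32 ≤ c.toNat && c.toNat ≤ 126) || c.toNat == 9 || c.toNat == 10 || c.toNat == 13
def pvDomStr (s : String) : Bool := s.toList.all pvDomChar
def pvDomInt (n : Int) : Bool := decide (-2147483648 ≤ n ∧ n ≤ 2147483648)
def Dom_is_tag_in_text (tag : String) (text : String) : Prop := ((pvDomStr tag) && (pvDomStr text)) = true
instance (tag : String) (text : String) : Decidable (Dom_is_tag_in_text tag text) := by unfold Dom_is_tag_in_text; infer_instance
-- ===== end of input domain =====

-- B replaces A's manual find/advance-by-len(tag) position loop by one text.split(tag) whose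
-- part boundaries are exactly the non-overlapping occurrences A visits, then a scan of the
-- parts' edge characters (objective: alternative decomposition, same cost).


-- ===== PORT A =====
-- A's while loop; the fuel only bounds the iteration count (for a nonempty tag the loop
-- advances pos by at least 1 per iteration, so text.length + 1 iterations always suffice;
-- for tag = "" Python loops forever on most texts — excluded by Pre_).
def isTagLoopA (tag text : List Char) : Nat → Int → Bool
  | 0, _ => false
  | fuel+1, pos =>
    if pos < PySem.Chars.len text then
      let p := PySem.Chars.findFrom text tag pos
      if p = -1 then false
      else
        let prevChar : Bool :=
          if p - 1 < 0 then true
          else (PySem.List.pyGetD text (p - 1) ' ' == ' ' || PySem.List.pyGetD text (p - 1) ' ' == ','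
                || PySem.List.pyGetD text (p - 1) ' ' == '\n')
        let nextChar : Bool :=
          if p + PySem.Chars.len tag ≥ PySem.Chars.len text then true
          else (PySem.List.pyGetD text (p + PySem.Chars.len tag) ' ' == ' '
                || PySem.List.pyGetD text (p + PySem.Chars.len tag) ' ' == ','
                || PySem.List.pyGetD text (p + PySem.Chars.len tag) ' ' == '\n')
        if nextChar && prevChar then true
        else isTagLoopA tag text fuel (p + PySem.Chars.len tag)
    else false

def is_tag_in_text (tag : String) (text : String) : Bool :=
  let tag1 := PySem.Str.replace tag "-" " "
  let tag2 := if tag1 = "react native" then "reactjs native" else tag1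
  isTagLoopA tag2.toList text.toList (text.toList.length + 1) 0

-- ===== PORT B =====
-- Source B's _ok over DELIMS; Python's None is Option.none
def okDelim : Option Char → Bool
  | none => true
  | some c => c == ' ' || c == ',' || c == '\n'

-- Source B's while loop over the remaining parts ('parts = parts[1:]' = recursion on the tail)
def scanB (tag : List Char) : List (List Char) → Option Char → Bool
  | [], _ => false
  | [_], _ => false
  | head :: nxt :: rest, left =>
    let leftChar : Option Char := if head.isEmpty then left else head.getLast?
    let rightChar : Option Char :=
      if !nxt.isEmpty then nxt.head? else if rest.isEmpty then none else tag.head?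
    if okDelim leftChar && okDelim rightChar then true
    else scanB tag (nxt :: rest) tag.getLast?

def is_tag_in_text_alt (tag : String) (text : String) : Bool :=
  let tag1 := PySem.Str.replace tag "-" " "
  let tag2 := if tag1 = "react native" then "reactjs native" else tag1
  match PySem.Chars.split? text.toList tag2.toList with
  | none => false   -- Python raises ValueError here (empty separator, i.e. tag = ""); excluded by Pre_
  | some parts => scanB tag2.toList parts none

-- ===== PRECONDITION & SPEC =====
-- Pre_ excludes only the empty tag: there A loops forever on any text whose first character
-- is not a delimiter (pos += len(tag) makes no progress) and B's text.split('') raises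
-- ValueError; on the remaining empty-tag inputs A returns a value but B still raises.
def Pre_is_tag_in_text (tag : String) (text : String) : Prop := tag ≠ ""
instance (tag : String) (text : String) : Decidable (Pre_is_tag_in_text tag text) := by
  unfold Pre_is_tag_in_text; infer_instance

def pvWitness_is_tag_in_text : String × String := ("go", "we use go, daily")

def Spec_is_tag_in_text (tag : String) (text : String) (out : Bool) : Prop :=
  out = is_tag_in_text_alt tag text
instance (tag : String) (text : String) (out : Bool) : Decidable (Spec_is_tag_in_text tag text out) := by
  unfold Spec_is_tag_in_text; infer_instance

-- ===== CLAIM (what is proved, stated in full; the proofs are below) =====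
def Claim_equal_is_tag_in_text : Prop := ∀ (tag : String) (text : String),
  Dom_is_tag_in_text tag text → Pre_is_tag_in_text tag text →
  Spec_is_tag_in_text tag text (is_tag_in_text tag text)

-- ===== LEMMAS AND PROOFS =====

-- prepend to the first piece (the reference split keeps pieces in order)
def headGlue (x : List Char) : List (List Char) → List (List Char)
  | [] => [x]
  | p :: ps => (x ++ p) :: ps

-- fuel-free reference form of Python's str.split for a nonempty separator
def splits (sep : List Char) : List Char → List (List Char)
  | [] => [[]]
  | c :: rest =>
    if h : sep ≠ [] ∧ sep.isPrefixOf (c :: rest) then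
      [] :: splits sep ((c :: rest).drop sep.length)
    else
      headGlue [c] (splits sep rest)
  termination_by l => l.length
  decreasing_by
    · have : 1 ≤ sep.length := by
        cases hs : sep with
        | nil => exact absurd hs h.1
        | cons a l => simp
      simp only [List.length_drop, List.length_cons]
      omega
    · simp only [List.length_cons]; omega

theorem headGlue_ne_nil (x : List Char) (xs : List (List Char)) : headGlue x xs ≠ [] := by
  cases xs <;> simp [headGlue]

theorem splits_ne_nil (sep l : List Char) : splits sep l ≠ [] := by
  cases l with
  | nil => simp [splits]
  | cons c rest =>
    rw [splits]
    split
    · simp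
    · exact headGlue_ne_nil _ _

theorem headGlue_nil_eq (xs : List (List Char)) (h : xs ≠ []) : headGlue [] xs = xs := by
  cases xs with
  | nil => exact absurd rfl h
  | cons p ps => simp [headGlue]

theorem headGlue_headGlue (x y : List Char) (xs : List (List Char)) :
    headGlue x (headGlue y xs) = headGlue (x ++ y) xs := by
  cases xs <;> simp [headGlue]

theorem go_eq (sep : List Char) (hsep : sep ≠ []) :
    ∀ (n fuel : Nat) (l cur : List Char) (acc : List (List Char)),
      l.length ≤ n → l.length ≤ fuel →
      PySem.Chars.splitOn.go sep fuel l cur acc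
        = acc.reverse ++ headGlue cur.reverse (splits sep l) := by
  intro n
  induction n with
  | zero =>
    intro fuel l cur acc h1 _
    have : l = [] := List.length_eq_zero_iff.mp (Nat.le_zero.mp h1)
    subst this
    cases fuel <;> simp [PySem.Chars.splitOn.go, splits, headGlue]
  | succ n ih =>
    intro fuel l cur acc h1 h2
    cases l with
    | nil => cases fuel <;> simp [PySem.Chars.splitOn.go, splits, headGlue]
    | cons c rest =>
      cases fuel with
      | zero => simp at h2
      | succ f =>
        have hs1 : 1 ≤ sep.length := by
          cases hs : sep with
          | nil => exact absurd hs hsep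
          | cons a l => simp
        rw [PySem.Chars.splitOn.go]
        by_cases hp : sep.isPrefixOf (c :: rest)
        · rw [if_pos hp]
          rw [ih f ((c :: rest).drop sep.length) [] (cur.reverse :: acc)
              (by simp only [List.length_drop, List.length_cons]; simp at h1 h2; omega)
              (by simp only [List.length_drop, List.length_cons]; simp at h1 h2; omega)]
          rw [splits, dif_pos ⟨hsep, hp⟩]
          simp only [List.reverse_nil]
          rw [headGlue_nil_eq _ (splits_ne_nil _ _)]
          simp [headGlue]
        · rw [if_neg hp]
          rw [ih f rest (c :: cur) acc (by simp at h1 ⊢; omega) (by simp at h2 ⊢; omega)]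
          rw [splits, dif_neg (by intro hh; exact hp hh.2)]
          rw [headGlue_headGlue]
          simp

theorem find_eq_of (s sub : List Char) (k : Nat)
    (h1 : sub <+: s.drop k) (h2 : ∀ i < k, ¬ sub <+: s.drop i) :
    PySem.Chars.find s sub = (k : Int) := by
  have hinf : sub <:+: s := h1.isInfix.trans (s.drop_suffix k).isInfix
  have h0 : 0 ≤ PySem.Chars.find s sub := (PySem.Chars.find_nonneg_iff s sub).mpr hinf
  obtain ⟨hp, hmin⟩ := PySem.Chars.find_spec h0
  rcases Nat.lt_trichotomy (PySem.Chars.find s sub).toNat k with h | h | h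
  · exact absurd hp (h2 _ h)
  · omega
  · exact absurd h1 (hmin k h)


theorem splits_of_not_infix (sep : List Char) (_hsep : sep ≠ []) :
    ∀ l : List Char, ¬ sep <:+: l → splits sep l = [l] := by
  intro l
  induction l with
  | nil => intro _; simp [splits]
  | cons c rest ih =>
    intro h
    rw [splits, dif_neg (by
      intro hh
      exact h (List.IsPrefix.isInfix (List.isPrefixOf_iff_prefix.mp hh.2)))]
    rw [ih (fun hi => h (hi.trans (List.suffix_cons c rest).isInfix))]
    rfl


theorem splits_of_find (sep : List Char) (hsep : sep ≠ []) :
    ∀ (n : Nat) (l : List Char), l.length ≤ n → 0 ≤ PySem.Chars.find l sep →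
      splits sep l
        = l.take (PySem.Chars.find l sep).toNat
            :: splits sep (l.drop ((PySem.Chars.find l sep).toNat + sep.length)) := by
  intro n
  induction n with
  | zero =>
    intro l h1 h0
    have : l = [] := List.length_eq_zero_iff.mp (Nat.le_zero.mp h1)
    subst this
    have : sep <:+: [] := (PySem.Chars.find_nonneg_iff [] sep).mp h0
    exact absurd (List.infix_nil.mp this) hsep
  | succ n ih =>
    intro l h1 h0
    obtain ⟨hp, hmin⟩ := PySem.Chars.find_spec h0
    set k := (PySem.Chars.find l sep).toNat with hk
    cases l with
    | nil =>
      have : sep <:+: [] := (PySem.Chars.find_nonneg_iff [] sep).mp h0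
      exact absurd (List.infix_nil.mp this) hsep
    | cons c rest =>
      by_cases hk0 : k = 0
      · rw [hk0]
        simp only [List.take_zero] at *
        rw [splits, dif_pos ⟨hsep, List.isPrefixOf_iff_prefix.mpr (by rw [hk0] at hp; simpa using hp)⟩]
        simp
      · have hknz : 0 < k := Nat.pos_of_ne_zero hk0
        have hnp : ¬ sep <+: (c :: rest) := by
          have := hmin 0 hknz
          simpa using this
        rw [splits, dif_neg (by intro hh; exact hnp (List.isPrefixOf_iff_prefix.mp hh.2))]
        have hfr : PySem.Chars.find rest sep = ((k - 1 : Nat) : Int) := by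
          apply find_eq_of
          · have hdk : (c :: rest).drop k = rest.drop (k - 1) := by
              conv_lhs => rw [show k = (k - 1) + 1 from by omega]
              rw [List.drop_succ_cons]
            rw [← hdk]; exact hp
          · intro i hi
            have := hmin (i + 1) (by omega)
            rw [List.drop_succ_cons] at this
            exact this
        have hrest : splits sep rest
            = rest.take (k - 1) :: splits sep (rest.drop ((k - 1) + sep.length)) := by
          have h2 := ih rest (by simp at h1; omega) (by rw [hfr]; exact Int.natCast_nonneg _)
          rw [hfr, Int.toNat_natCast] at h2
          exact h2
        rw [hrest]
        have hkk : k = (k - 1) + 1 := by omega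
        rw [hkk, List.take_succ_cons]
        have hstep : (k - 1) + 1 + sep.length = ((k - 1) + sep.length) + 1 := by omega
        rw [hstep, List.drop_succ_cons]
        simp [headGlue]

theorem rc_spec (sep : List Char) (hsep : sep ≠ []) (s q : List Char) (qs : List (List Char))
    (hs : splits sep s = q :: qs) :
    (if !q.isEmpty then q.head? else if qs.isEmpty then none else sep.head?) = s.head? := by
  by_cases h0 : 0 ≤ PySem.Chars.find s sep
  · have hcase := splits_of_find sep hsep s.length s le_rfl h0
    rw [hs] at hcase
    injection hcase with hq hqs
    obtain ⟨hp, hmin⟩ := PySem.Chars.find_spec h0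
    by_cases hk : (PySem.Chars.find s sep).toNat = 0
    · have hqnil : q = [] := by rw [hq, hk, List.take_zero]
      have hqsne : qs ≠ [] := by rw [hqs]; exact splits_ne_nil _ _
      subst hqnil
      rw [hk, List.drop_zero] at hp
      obtain ⟨t, ht⟩ := hp
      subst ht
      simp [hqsne, List.head?_append_of_ne_nil sep hsep]
    · have hsne : s ≠ [] := by
        intro hnil
        rw [hnil] at h0
        have : sep <:+: [] := (PySem.Chars.find_nonneg_iff [] sep).mp h0
        exact hsep (List.infix_nil.mp this)
      cases s with
      | nil => exact absurd rfl hsne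
      | cons a l =>
        have hq' : q = a :: l.take ((PySem.Chars.find (a :: l) sep).toNat - 1) := by
          rw [hq]
          conv_lhs => rw [show (PySem.Chars.find (a :: l) sep).toNat
              = ((PySem.Chars.find (a :: l) sep).toNat - 1) + 1 from by omega]
          rw [List.take_succ_cons]
        subst hq'
        simp
  · have hf : PySem.Chars.find s sep = -1 := by
      have := PySem.Chars.neg_one_le_find s sep
      omega
    have hni : ¬ sep <:+: s := (PySem.Chars.find_eq_neg_one_iff s sep).mp hf
    rw [splits_of_not_infix sep hsep s hni] at hs
    injection hs with hq hqs
    subst hq; subst hqs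
    cases s <;> simp

theorem bridge (tag text : List Char) (htag : tag ≠ []) :
    ∀ (fuel pos : Nat),
      text.length + 1 ≤ fuel + pos → pos ≤ text.length →
      isTagLoopA tag text fuel (pos : Int)
        = scanB tag (splits tag (text.drop pos))
            (if pos = 0 then none else text[pos - 1]?) := by
  intro fuel
  induction fuel with
  | zero => intro pos h1 h2; omega
  | succ f ih =>
    intro pos h1 h2
    have hL : 0 < tag.length := List.length_pos_iff.mpr htag
    rw [isTagLoopA]
    by_cases hpos : pos < text.length
    · rw [if_pos (by rw [PySem.Chars.len_eq]; exact_mod_cast hpos)]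
      rw [PySem.Chars.findFrom_natCast text tag pos (le_of_lt hpos)]
      by_cases hneg : PySem.Chars.find (text.drop pos) tag = -1
      · rw [splits_of_not_infix tag htag _
            ((PySem.Chars.find_eq_neg_one_iff _ _).mp hneg)]
        simp only [hneg, scanB, if_true]
      · have h0r : 0 ≤ PySem.Chars.find (text.drop pos) tag := by
          have := PySem.Chars.neg_one_le_find (text.drop pos) tag
          omega
        obtain ⟨k, hrk⟩ : ∃ k : Nat, PySem.Chars.find (text.drop pos) tag = (k : Int) :=
          ⟨_, (Int.toNat_of_nonneg h0r).symm⟩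
        obtain ⟨hpre0, hmin⟩ := PySem.Chars.find_spec h0r
        rw [hrk, Int.toNat_natCast] at hpre0
        rw [List.drop_drop] at hpre0
        have hkle : k ≤ text.length - pos := by
          have := PySem.Chars.find_le_length (text.drop pos) tag
          rw [hrk, List.length_drop] at this
          exact_mod_cast this
        have hLle : pos + k + tag.length ≤ text.length := by
          have := hpre0.length_le
          rw [List.length_drop] at this
          omega
        rw [splits_of_find tag htag (text.drop pos).length _ le_rfl h0r]
        rw [hrk, Int.toNat_natCast, List.drop_drop,
          show pos + (k + tag.length) = pos + k + tag.length from by omega]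
        obtain ⟨q, qs, hqqs⟩ : ∃ q qs, splits tag (text.drop (pos + k + tag.length)) = q :: qs := by
          cases hsp : splits tag (text.drop (pos + k + tag.length)) with
          | nil => exact absurd hsp (splits_ne_nil _ _)
          | cons q qs => exact ⟨q, qs, rfl⟩
        rw [hqqs]
        have hkm1 : ¬((k : Int) = -1) := by omega
        have hpk : ¬((pos : Int) + (k : Int) = -1) := by omega
        simp only [if_neg hkm1, if_neg hpk, PySem.Chars.len_eq, scanB]
        -- canonical left character
        have hleftc : (if (List.take k (text.drop pos)).isEmpty then
              (if pos = 0 then none else text[pos - 1]?)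
            else (List.take k (text.drop pos)).getLast?)
            = (if pos + k = 0 then none else text[pos + k - 1]?) := by
          cases k with
          | zero => simp
          | succ k' =>
            have hne : ¬ (List.take (k' + 1) (text.drop pos)).isEmpty := by
              simp [List.isEmpty_iff]
              omega
            rw [if_neg hne, if_neg (by omega)]
            rw [List.getLast?_eq_getElem?, List.length_take, List.length_drop]
            have hmin' : min (k' + 1) (text.length - pos) = k' + 1 := by omega
            rw [hmin', List.getElem?_take, if_pos (by omega), List.getElem?_drop,
              show pos + (k' + 1 - 1) = pos + (k' + 1) - 1 from by omega]
        -- canonical right character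
        have hrightc : (if !q.isEmpty then q.head? else if qs.isEmpty then none else tag.head?)
            = text[pos + k + tag.length]? := by
          rw [rc_spec tag htag _ q qs hqqs, List.head?_drop]
        -- A's prev test equals okDelim of the canonical left character
        have hA_prev : (if (pos : Int) + (k : Int) - 1 < 0 then true
              else (PySem.List.pyGetD text ((pos : Int) + (k : Int) - 1) ' ' == ' '
                || PySem.List.pyGetD text ((pos : Int) + (k : Int) - 1) ' ' == ','
                || PySem.List.pyGetD text ((pos : Int) + (k : Int) - 1) ' ' == '\n'))
            = okDelim (if pos + k = 0 then none else text[pos + k - 1]?) := by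
          by_cases hm : pos + k = 0
          · rw [if_pos (by omega : (pos : Int) + (k : Int) - 1 < 0), if_pos hm]; rfl
          · have hlt : pos + k - 1 < text.length := by omega
            have h0i : (0 : Int) ≤ (pos : Int) + (k : Int) - 1 := by omega
            have h1i : (pos : Int) + (k : Int) - 1 < (text.length : Int) := by omega
            rw [if_neg (by omega : ¬ ((pos : Int) + (k : Int) - 1 < 0)), if_neg hm]
            rw [PySem.List.pyGetD_eq_getElem text ' ' h0i h1i]
            simp only [show ((pos : Int) + (k : Int) - 1).toNat = pos + k - 1 from by omega]
            rw [List.getElem?_eq_getElem hlt]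
            rfl
        -- A's next test equals okDelim of the canonical right character
        have hA_next : (if (pos : Int) + (k : Int) + (tag.length : Int) ≥ (text.length : Int) then true
              else (PySem.List.pyGetD text ((pos : Int) + (k : Int) + (tag.length : Int)) ' ' == ' '
                || PySem.List.pyGetD text ((pos : Int) + (k : Int) + (tag.length : Int)) ' ' == ','
                || PySem.List.pyGetD text ((pos : Int) + (k : Int) + (tag.length : Int)) ' ' == '\n'))
            = okDelim (text[pos + k + tag.length]?) := by
          by_cases hge : text.length ≤ pos + k + tag.length
          · rw [if_pos (by exact_mod_cast hge), List.getElem?_eq_none (by omega)]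
            rfl
          · have hlt : pos + k + tag.length < text.length := by omega
            have h0i : (0 : Int) ≤ (pos : Int) + (k : Int) + (tag.length : Int) := by omega
            have h1i : (pos : Int) + (k : Int) + (tag.length : Int) < (text.length : Int) := by omega
            rw [if_neg (by exact_mod_cast hge)]
            rw [PySem.List.pyGetD_eq_getElem text ' ' h0i h1i]
            simp only [show ((pos : Int) + (k : Int) + (tag.length : Int)).toNat
              = pos + k + tag.length from by omega]
            rw [List.getElem?_eq_getElem hlt]
            rfl
        rw [hleftc, hrightc, hA_prev, hA_next, Bool.and_comm]
        by_cases hcond : (okDelim (if pos + k = 0 then none else text[pos + k - 1]?)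
            && okDelim (text[pos + k + tag.length]?)) = true
        · rw [if_pos hcond, if_pos hcond]
        · rw [if_neg hcond, if_neg hcond]
          have hcast : (pos : Int) + (k : Int) + (tag.length : Int)
              = ((pos + k + tag.length : Nat) : Int) := by push_cast; ring
          rw [hcast, ih (pos + k + tag.length) (by omega) (by omega), hqqs]
          congr 1
          rw [if_neg (by omega : ¬ (pos + k + tag.length = 0))]
          rw [List.getLast?_eq_getElem?]
          have hidx : pos + k + tag.length - 1 = (pos + k) + (tag.length - 1) := by omega
          rw [hidx, ← List.getElem?_drop]
          have hl1 : tag.length - 1 < tag.length := by omega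
          rw [List.getElem?_eq_getElem hl1,
            List.getElem?_eq_getElem (by rw [List.length_drop]; omega)]
          exact congrArg some (hpre0.getElem hl1).symm

    · have hpe : pos = text.length := by omega
      rw [if_neg (by rw [PySem.Chars.len_eq]; exact_mod_cast not_lt.mpr (le_of_eq hpe.symm))]
      rw [hpe, List.drop_length]
      simp [splits, scanB]

theorem replace_go_ne_nil (old new : List Char) (hnew : new ≠ []) :
    ∀ (fuel : Nat) (l acc : List Char), (l ≠ [] ∨ acc ≠ []) →
      PySem.Chars.replace.go old new fuel l acc ≠ [] := by
  intro fuel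
  induction fuel with
  | zero =>
    intro l acc h
    rw [PySem.Chars.replace.go]
    rcases h with h | h <;> simp [h]
  | succ f ih =>
    intro l acc h
    cases l with
    | nil =>
      rw [PySem.Chars.replace.go]
      · rcases h with h | h
        · exact absurd rfl h
        · simpa using h
      · omega
    | cons c t =>
      rw [PySem.Chars.replace.go]
      by_cases hp : old.isPrefixOf (c :: t)
      · rw [if_pos hp]
        exact ih _ _ (Or.inr (by simp [hnew]))
      · rw [if_neg hp]
        exact ih _ _ (Or.inr (by simp))

theorem splitOn_eq_splits (sep l : List Char) (hsep : sep ≠ []) :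
    PySem.Chars.splitOn l sep = splits sep l := by
  unfold PySem.Chars.splitOn
  rw [go_eq sep hsep l.length (l.length + 1) l [] [] le_rfl (by omega)]
  simp [headGlue_nil_eq _ (splits_ne_nil sep l)]

theorem replace_ne_nil (s : List Char) (hs : s ≠ []) :
    PySem.Chars.replace s ['-'] [' '] ≠ [] := by
  unfold PySem.Chars.replace
  simp only [List.isEmpty_iff, if_neg (by simp : ¬ (['-'] : List Char) = [])]
  exact replace_go_ne_nil _ _ (by simp) _ _ _ (Or.inl hs)

-- both ports agree for any nonempty (already preprocessed) tag
theorem ports_agree (tg text : List Char) (htg : tg ≠ []) :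
    isTagLoopA tg text (text.length + 1) 0
      = (match PySem.Chars.split? text tg with
         | none => false
         | some parts => scanB tg parts none) := by
  rw [show PySem.Chars.split? text tg = some (PySem.Chars.splitOn text tg) from by
    unfold PySem.Chars.split?
    rw [if_neg (by simpa [List.isEmpty_iff] using htg)]]
  simp only
  rw [splitOn_eq_splits _ _ htg]
  have h := bridge tg text htg (text.length + 1) 0 (by omega) (by omega)
  simpa using h

-- ===== VERDICT (by name: the statement is the Claim_ definition above) =====
theorem is_tag_in_text_spec : Claim_equal_is_tag_in_text := by
  intro tag text _ hpre
  unfold Spec_is_tag_in_text is_tag_in_text is_tag_in_text_alt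
  have htl : tag.toList ≠ [] := fun h => hpre (String.toList_eq_nil_iff.mp h)
  have ht1 : (PySem.Str.replace tag "-" " ").toList ≠ [] := by
    rw [PySem.Str.toList_replace]
    exact replace_ne_nil tag.toList htl
  have ht2 : (if PySem.Str.replace tag "-" " " = "react native" then "reactjs native"
      else PySem.Str.replace tag "-" " ").toList ≠ [] := by
    split
    · decide
    · exact ht1
  exact ports_agree _ text.toList ht2
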